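-- pv_equiv track=rewrite | github.com/yekaiwu/Lego_Assembly | src/vision_processing/metadata_models.py | _list_to_ranges
-- ===== SOURCE A (Python) =====
-- from typing import List, Dict, Any, Optional, Tuple
--
-- def _list_to_ranges(pages: List[int]) -> List[Tuple[int, int]]:
--     """
--     Convert list of page numbers to consecutive ranges.
--
--     Args:
--         pages: Sorted list of page numbers
--
--     Returns:
--         List of (start, end) tuples representing consecutive ranges
--     """
--     if not pages:
--         return []
--
--     sorted_pages = sorted(pages)
--     ranges = []
--     start = sorted_pages[0]
--     end = sorted_pages[0]
--
--     for page in sorted_pages[1:]: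
--         if page == end + 1:
--             # Consecutive page, extend range
--             end = page
--         else:
--             # Gap found, save current range and start new one
--             ranges.append((start, end))
--             start = page
--             end = page
--
--     # Add final range
--     ranges.append((start, end))
--
--     return ranges
-- ===== SOURCE B (Python) =====
-- from typing import List, Tuple
--
-- def _list_to_ranges(pages: List[int]) -> List[Tuple[int, int]]:
--     # Ranges via break points: a "break" is an adjacent pair (a, b) of the
--     # sorted list with b - a != 1.  The run starts are the first element plus
--     # the second components of the breaks; the run ends are the first
--     # components of the breaks plus the last element; zipping starts with
--     # ends yields the ranges.
--     s = sorted(pages)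
--     if not s:
--         return []
--     breaks = [(a, b) for a, b in zip(s, s[1:]) if b - a != 1]
--     starts = [s[0]] + [b for _, b in breaks]
--     ends = [a for a, _ in breaks] + [s[-1]]
--     return list(zip(starts, ends))
-- ===== Notes on version B (the rewrite author's own statement) =====
-- stated objective: alternative
-- what changed: B computes the set of adjacent 'break' pairs of the sorted list once, derives the starts list (first element plus break successors) and the ends list (break predecessors plus last element) independently, and zips them, instead of A's stateful scan that tracks and mutates a current start/end range.
import Mathlib
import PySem

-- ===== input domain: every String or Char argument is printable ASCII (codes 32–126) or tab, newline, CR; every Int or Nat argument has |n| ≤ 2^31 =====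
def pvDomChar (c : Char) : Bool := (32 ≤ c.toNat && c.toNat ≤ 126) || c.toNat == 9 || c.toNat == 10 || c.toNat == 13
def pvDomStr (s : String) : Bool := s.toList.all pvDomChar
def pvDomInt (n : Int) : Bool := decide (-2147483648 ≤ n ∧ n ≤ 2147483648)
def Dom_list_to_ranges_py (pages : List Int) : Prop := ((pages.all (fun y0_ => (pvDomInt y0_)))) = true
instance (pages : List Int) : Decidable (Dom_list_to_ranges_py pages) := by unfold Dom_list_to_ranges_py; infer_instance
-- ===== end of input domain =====

-- B computes the adjacent "break" pairs of the sorted list once and zips the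
-- independently derived starts/ends lists, instead of A's stateful start/end scan:
-- an alternative decomposition, same cost.


-- ===== PORT A =====
def list_to_ranges_py (pages : List Int) : List (Int × Int) :=
  if pages = [] then []
  else
    match PySem.List.sorted pages (fun x => x) false with
    | [] => []  -- unreachable: sorted of a nonempty list is nonempty
    | s0 :: rest =>
      let st := (rest.foldl
        (fun (acc : List (Int × Int) × Int × Int) page =>
          let (ranges, start, «end») := acc
          if page = «end» + 1 then (ranges, start, page)
          else (ranges ++ [(start, «end»)], page, page))
        ([], s0, s0))
      st.1 ++ [(st.2.1, st.2.2)]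

-- ===== PORT B =====
def list_to_ranges_py_alt (pages : List Int) : List (Int × Int) :=
  match PySem.List.sorted pages (fun x => x) false with
  | [] => []
  | s0 :: t =>
    let s := s0 :: t
    -- zip(s, s[1:]); s[1:] is PySem.List.slice s 1 none = s.tail (slice_from_one)
    let breaks := (s.zip s.tail).filter (fun ab => decide (ab.2 - ab.1 ≠ 1))
    let starts := s0 :: breaks.map Prod.snd
    -- s[-1]: pyGet? s (-1) = getLast?, always some on the nonempty s (getD never used)
    let ends := breaks.map Prod.fst ++ [(PySem.List.pyGet? s (-1)).getD 0]
    starts.zip ends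

-- ===== PRECONDITION & SPEC =====
def Spec_list_to_ranges_py (pages : List Int) (out : List (Int × Int)) : Prop := out = list_to_ranges_py_alt pages
instance (pages : List Int) (out : List (Int × Int)) : Decidable (Spec_list_to_ranges_py pages out) := by unfold Spec_list_to_ranges_py; infer_instance

-- ===== CLAIM (what is proved, stated in full; the proofs are below) =====
def Claim_equal_list_to_ranges_py : Prop := ∀ (pages : List Int), Dom_list_to_ranges_py pages → Spec_list_to_ranges_py pages (list_to_ranges_py pages)

-- ===== LEMMAS AND PROOFS =====

-- the common recursive characterisation: runs of consecutive integers starting from (st, en)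
def pvRuns (st en : Int) : List Int → List (Int × Int)
  | [] => [(st, en)]
  | p :: t => if p = en + 1 then pvRuns st p t else (st, en) :: pvRuns p p t

-- the end value and remaining runs do not depend on the recorded start
def pvEnd (en : Int) : List Int → Int
  | [] => en
  | p :: t => if p = en + 1 then pvEnd p t else en

def pvRest (en : Int) : List Int → List (Int × Int)
  | [] => []
  | p :: t => if p = en + 1 then pvRest p t else pvRuns p p t

theorem pvRuns_eq (st en : Int) (l : List Int) :
    pvRuns st en l = (st, pvEnd en l) :: pvRest en l := by
  induction l generalizing st en with
  | nil => rfl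
  | cons p t ih =>
    simp only [pvRuns, pvEnd, pvRest]
    split_ifs with h
    · exact ih st p
    · rfl

-- A's loop computes pvRuns (with its accumulated prefix in front)
theorem foldA_eq (l : List Int) (acc : List (Int × Int)) (st en : Int) :
    (let r := l.foldl
        (fun (acc : List (Int × Int) × Int × Int) page =>
          let (ranges, start, e) := acc
          if page = e + 1 then (ranges, start, page)
          else (ranges ++ [(start, e)], page, page))
        (acc, st, en)
     r.1 ++ [(r.2.1, r.2.2)]) = acc ++ pvRuns st en l := by
  induction l generalizing acc st en with
  | nil => simp [pvRuns]
  | cons p t ih =>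
    simp only [List.foldl_cons, pvRuns]
    split_ifs with h
    · exact ih acc st p
    · rw [ih (acc ++ [(st, en)]) p p]
      simp

-- B's zip of starts and ends computes pvRuns
theorem zip_starts_ends (x : Int) (t : List Int) :
    (x :: ((((x :: t).zip t).filter (fun ab => decide (ab.2 - ab.1 ≠ 1))).map Prod.snd)).zip
      (((((x :: t).zip t).filter (fun ab => decide (ab.2 - ab.1 ≠ 1))).map Prod.fst) ++ [(x :: t).getLast (by simp)])
      = pvRuns x x t := by
  induction t generalizing x with
  | nil => simp [pvRuns]
  | cons y t' ih =>
    have hlast : (x :: y :: t').getLast (by simp) = (y :: t').getLast (by simp) := by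
      simp [List.getLast_cons]
    have hzip : (x :: y :: t').zip (y :: t') = (x, y) :: ((y :: t').zip t') := rfl
    by_cases h : y = x + 1
    · have hbx : ¬ (y - x ≠ 1) := by omega
      have hd : decide ((y : Int) - x ≠ 1) = false := decide_eq_false hbx
      rw [hzip]
      simp only [List.filter_cons, hd, Bool.false_eq_true, if_false, hlast]
      -- LHS now: (x :: breaks'.map snd).zip (breaks'.map fst ++ [last'])
      have := ih y
      -- decompose IH: both sides are cons
      rw [pvRuns_eq y y t'] at this
      -- ends' is nonempty: breaks'.map fst ++ [last']
      have hends : ∃ e0 er, ((((y :: t').zip t').filter (fun ab => decide (ab.2 - ab.1 ≠ 1))).map Prod.fst) ++ [(y :: t').getLast (by simp)] = e0 :: er := by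
        cases hE : ((((y :: t').zip t').filter (fun ab => decide (ab.2 - ab.1 ≠ 1))).map Prod.fst) ++ [(y :: t').getLast (by simp)] with
        | nil => exact absurd hE (by simp)
        | cons e0 er => exact ⟨e0, er, rfl⟩
      obtain ⟨e0, er, hE⟩ := hends
      rw [hE] at this ⊢
      rw [List.zip_cons_cons] at this ⊢
      have h1 : (y, e0) = (y, pvEnd y t') := (List.cons.injEq _ _ _ _ ▸ this).1
      have h2 : ((((y :: t').zip t').filter (fun ab => decide (ab.2 - ab.1 ≠ 1))).map Prod.snd).zip er = pvRest y t' := (List.cons.injEq _ _ _ _ ▸ this).2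
      have he0 : e0 = pvEnd y t' := by injection h1
      rw [he0, h2]
      rw [show pvRuns x x (y :: t') = pvRuns x y t' from by simp [pvRuns, h],
        pvRuns_eq x y t']
    · have hbx : (y - x ≠ 1) := by omega
      have hd : decide ((y : Int) - x ≠ 1) = true := decide_eq_true hbx
      rw [hzip]
      simp only [List.filter_cons, hd, if_true, List.map_cons, hlast]
      rw [List.cons_append, List.zip_cons_cons, ih y]
      simp [pvRuns, h]

theorem sorted_ne_nil (pages : List Int) (h : pages ≠ []) :
    PySem.List.sorted pages (fun x => x) false ≠ [] := by
  intro hs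
  have hperm : (PySem.List.sorted pages (fun x => x) false).Perm pages := PySem.List.sorted_perm pages (fun x => x) false
  rw [hs] at hperm
  exact h (List.Perm.nil_eq hperm).symm

-- ===== VERDICT (by name: the statement is the Claim_ definition above) =====
theorem list_to_ranges_py_spec : Claim_equal_list_to_ranges_py := by
  intro pages _
  unfold Spec_list_to_ranges_py list_to_ranges_py list_to_ranges_py_alt
  by_cases hp : pages = []
  · subst hp; rfl
  · rw [if_neg hp]
    rcases hs : PySem.List.sorted pages (fun x => x) false with _ | ⟨s0, rest⟩
    · exact absurd hs (sorted_ne_nil pages hp)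
    · simp only []
      have hA := foldA_eq rest ([] : List (Int × Int)) s0 s0
      simp only [List.nil_append] at hA
      rw [hA]
      -- B side: tail of s, pyGet? -1 = getLast
      have hget : (PySem.List.pyGet? (s0 :: rest) (-1)).getD 0 = (s0 :: rest).getLast (by simp) := by
        rw [PySem.List.pyGet?_neg_one]
        simp [List.getLast?_eq_getLast]
      rw [show (s0 :: rest).tail = rest from rfl, hget]
      exact (zip_starts_ends s0 rest).symm
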